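-- pv_equiv track=rewrite | github.com/bhedav980-spec/vtenders-backend | main.py | extract_rule_based_make_vendor
-- ===== SOURCE A (Python) =====
-- from typing import List, Dict, Any
--
-- def extract_rule_based_make_vendor(context_text: str) -> Dict[str, str]:
--     lower = context_text.lower()
--     approved_make = "-"
--     vendor_list = "-"
--     standards = "-"
--
--     make_lines = []
--     vendor_lines = []
--     standard_lines = []
--
--     for line in context_text.splitlines():
--         l = line.lower()
--
--         if any(x in l for x in ["approved make", "make:", "make -", "brand", "manufacturer"]):
--             make_lines.append(line)
--
--         if any(x in l for x in ["vendor", "supplier", "authorized dealer", "approved vendor"]):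
--             vendor_lines.append(line)
--
--         if any(x in l for x in ["is ", "iec", "ieee", "bis", "cpwd", "morth", "standard", "as per"]):
--             standard_lines.append(line)
--
--     if make_lines:
--         approved_make = "\n".join(make_lines[:8])
--
--     if vendor_lines:
--         vendor_list = "\n".join(vendor_lines[:8])
--
--     if standard_lines:
--         standards = "\n".join(standard_lines[:8])
--
--     return {
--         "approved_make": approved_make,
--         "vendor_list": vendor_list,
--         "standards": standards
--     }
-- ===== SOURCE B (Python) =====
-- def _pick(lines, keywords):
--     # collect matching lines but stop as soon as 8 are found (early cutoff)
--     out = []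
--     for line in lines:
--         l = line.lower()
--         if any(k in l for k in keywords):
--             out.append(line)
--             if len(out) == 8:
--                 break
--     return "\n".join(out) if out else "-"
--
--
-- def extract_rule_based_make_vendor(context_text: str):
--     lines = context_text.splitlines()
--     return {
--         "approved_make": _pick(lines, ["approved make", "make:", "make -", "brand", "manufacturer"]),
--         "vendor_list": _pick(lines, ["vendor", "supplier", "authorized dealer", "approved vendor"]),
--         "standards": _pick(lines, ["is ", "iec", "ieee", "bis", "cpwd", "morth", "standard", "as per"]),
--     }
-- ===== Notes on version B (the rewrite author's own statement) =====
-- stated objective: simpler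
-- what changed: Replaces A's single loop threading three accumulator lists (then slicing each to 8) with one small per-category helper that scans the lines and stops as soon as 8 matches are collected, called three times.
import Mathlib
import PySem

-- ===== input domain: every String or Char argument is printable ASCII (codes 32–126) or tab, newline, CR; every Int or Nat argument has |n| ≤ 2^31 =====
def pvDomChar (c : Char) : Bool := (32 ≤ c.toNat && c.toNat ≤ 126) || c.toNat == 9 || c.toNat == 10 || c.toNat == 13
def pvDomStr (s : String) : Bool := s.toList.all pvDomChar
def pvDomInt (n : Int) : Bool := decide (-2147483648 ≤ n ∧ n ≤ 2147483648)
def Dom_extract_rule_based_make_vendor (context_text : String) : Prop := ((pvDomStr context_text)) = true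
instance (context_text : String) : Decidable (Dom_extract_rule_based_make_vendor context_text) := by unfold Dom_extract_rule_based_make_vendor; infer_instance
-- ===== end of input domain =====

-- B replaces A's single three-accumulator loop by one per-category scan that stops at 8 matches; objective: simpler (return value only).


-- ===== PORT A =====
def kwMake : List String := ["approved make", "make:", "make -", "brand", "manufacturer"]
def kwVendor : List String := ["vendor", "supplier", "authorized dealer", "approved vendor"]
def kwStd : List String := ["is ", "iec", "ieee", "bis", "cpwd", "morth", "standard", "as per"]

def extract_rule_based_make_vendor (context_text : String) : List (String × String) :=
  let st := (PySem.Str.splitlines context_text).foldl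
    (fun (st : List String × List String × List String) line =>
      let l := PySem.Str.lower line
      let st := if kwMake.any (fun x => PySem.Str.isIn x l) then (st.1 ++ [line], st.2.1, st.2.2) else st
      let st := if kwVendor.any (fun x => PySem.Str.isIn x l) then (st.1, st.2.1 ++ [line], st.2.2) else st
      if kwStd.any (fun x => PySem.Str.isIn x l) then (st.1, st.2.1, st.2.2 ++ [line]) else st)
    ([], [], [])
  let approved_make := if st.1 ≠ [] then PySem.Str.join "\n" (PySem.List.slice st.1 none (some 8)) else "-"
  let vendor_list := if st.2.1 ≠ [] then PySem.Str.join "\n" (PySem.List.slice st.2.1 none (some 8)) else "-"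
  let standards := if st.2.2 ≠ [] then PySem.Str.join "\n" (PySem.List.slice st.2.2 none (some 8)) else "-"
  [("approved_make", approved_make), ("vendor_list", vendor_list), ("standards", standards)]

-- ===== PORT B =====
def pickGo (ks : List String) : List String → List String → List String
  | [], out => out
  | line :: rest, out =>
    let l := PySem.Str.lower line
    if ks.any (fun k => PySem.Str.isIn k l) then
      let out' := out ++ [line]
      if out'.length = 8 then out' else pickGo ks rest out'
    else pickGo ks rest out

def pick (lines : List String) (ks : List String) : String :=
  let out := pickGo ks lines []
  if out ≠ [] then PySem.Str.join "\n" out else "-"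

def extract_rule_based_make_vendor_alt (context_text : String) : List (String × String) :=
  let lines := PySem.Str.splitlines context_text
  [("approved_make", pick lines kwMake),
   ("vendor_list", pick lines kwVendor),
   ("standards", pick lines kwStd)]

-- ===== PRECONDITION & SPEC =====
def Spec_extract_rule_based_make_vendor (context_text : String) (out : List (String × String)) : Prop := out = extract_rule_based_make_vendor_alt context_text
instance (context_text : String) (out : List (String × String)) : Decidable (Spec_extract_rule_based_make_vendor context_text out) := by unfold Spec_extract_rule_based_make_vendor; infer_instance

-- ===== CLAIM (what is proved, stated in full; the proofs are below) =====
def Claim_equal_extract_rule_based_make_vendor : Prop := ∀ (context_text : String), Dom_extract_rule_based_make_vendor context_text → Spec_extract_rule_based_make_vendor context_text (extract_rule_based_make_vendor context_text)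

-- ===== LEMMAS AND PROOFS =====

def lineMatch (ks : List String) (line : String) : Bool :=
  ks.any (fun k => PySem.Str.isIn k (PySem.Str.lower line))

-- A's fold collects, onto the given accumulators, the three filtered lists
theorem foldA_eq (lines : List String) (a b c : List String) :
    lines.foldl
      (fun (st : List String × List String × List String) line =>
        let l := PySem.Str.lower line
        let st := if kwMake.any (fun x => PySem.Str.isIn x l) then (st.1 ++ [line], st.2.1, st.2.2) else st
        let st := if kwVendor.any (fun x => PySem.Str.isIn x l) then (st.1, st.2.1 ++ [line], st.2.2) else st
        if kwStd.any (fun x => PySem.Str.isIn x l) then (st.1, st.2.1, st.2.2 ++ [line]) else st)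
      (a, b, c)
    = (a ++ lines.filter (lineMatch kwMake),
       b ++ lines.filter (lineMatch kwVendor),
       c ++ lines.filter (lineMatch kwStd)) := by
  induction lines generalizing a b c with
  | nil => simp
  | cons line rest ih =>
    simp only [List.foldl_cons, List.filter_cons, lineMatch]
    split_ifs <;> simp_all

-- B's early-cutoff scan produces the first (8 - out.length) matches
theorem pickGo_eq (ks : List String) (lines : List String) (out : List String)
    (h : out.length < 8) :
    pickGo ks lines out = out ++ (lines.filter (lineMatch ks)).take (8 - out.length) := by
  induction lines generalizing out with
  | nil => simp [pickGo]
  | cons line rest ih =>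
    simp only [pickGo, List.filter_cons, lineMatch]
    by_cases hm : ks.any (fun k => PySem.Str.isIn k (PySem.Str.lower line)) = true
    · simp only [hm, if_pos]
      by_cases h8 : (out ++ [line]).length = 8
      · have hl : out.length = 7 := by simp at h8; omega
        simp [h8, hl]
      · have hlt : (out ++ [line]).length < 8 := by simp at h8 ⊢; omega
        rw [if_neg h8, ih _ hlt]
        have : 8 - out.length = (8 - (out ++ [line]).length) + 1 := by
          simp at h8 ⊢; omega
        simp [this, List.take_succ_cons]
    · simp only [hm]
      simp [ih _ h]

theorem slice_take8 (xs : List String) :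
    PySem.List.slice xs none (some 8) = xs.take 8 := by
  simpa using PySem.List.slice_to xs (b := 8) (by norm_num)

theorem pick_eq (lines : List String) (ks : List String) :
    pick lines ks =
      if lines.filter (lineMatch ks) ≠ [] then
        PySem.Str.join "\n" ((lines.filter (lineMatch ks)).take 8)
      else "-" := by
  unfold pick
  rw [pickGo_eq ks lines [] (by norm_num)]
  simp

-- ===== VERDICT (by name: the statement is the Claim_ definition above) =====
theorem extract_rule_based_make_vendor_spec : Claim_equal_extract_rule_based_make_vendor := by
  intro context_text _
  unfold Spec_extract_rule_based_make_vendor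
  unfold extract_rule_based_make_vendor extract_rule_based_make_vendor_alt
  rw [foldA_eq]
  simp only [List.nil_append, slice_take8, pick_eq]
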